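-- pv_equiv track=rewrite | github.com/strange-38/SaintMaryAdmissionTest | Question 2.py | calculate_ranking
-- ===== SOURCE A (Python) =====
-- def calculate_ranking(GR: list) -> list:
--     """
--     Assign a ranking based on growth rates.
--
--     Parameters:
--     GR: List of growth rates for consecutive years.
--
--     Returns:
--     ranking: List of rankings corresponding to growth rates.
--     """
--     ranking = []
--     for rate in GR:
--         if rate > 25:
--             ranking.append("Exceptional")
--         elif rate > 0:
--             ranking.append("Good")
--         else:
--             ranking.append("Poor")
--     return ranking
-- ===== SOURCE B (Python) =====
-- def calculate_ranking(GR: list) -> list: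
--     """
--     Staged-overwrite version: paint every position "Poor", then overwrite the
--     positive ones with "Good" in a second pass, then overwrite the >25 ones
--     with "Exceptional" in a third pass.
--     """
--     ranking = ["Poor"] * len(GR)
--     for i, rate in enumerate(GR):
--         if rate > 0:
--             ranking[i] = "Good"
--     for i, rate in enumerate(GR):
--         if rate > 25:
--             ranking[i] = "Exceptional"
--     return ranking
-- ===== Notes on version B (the rewrite author's own statement) =====
-- stated objective: alternative
-- what changed: Replaces the single-pass if/elif ladder that appends one of three labels with three staged passes over a mutable array: initialise all positions to "Poor", then a pass that overwrites positions with rate>0 to "Good", then a pass that overwrites positions with rate>25 to "Exceptional".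
import Mathlib
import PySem

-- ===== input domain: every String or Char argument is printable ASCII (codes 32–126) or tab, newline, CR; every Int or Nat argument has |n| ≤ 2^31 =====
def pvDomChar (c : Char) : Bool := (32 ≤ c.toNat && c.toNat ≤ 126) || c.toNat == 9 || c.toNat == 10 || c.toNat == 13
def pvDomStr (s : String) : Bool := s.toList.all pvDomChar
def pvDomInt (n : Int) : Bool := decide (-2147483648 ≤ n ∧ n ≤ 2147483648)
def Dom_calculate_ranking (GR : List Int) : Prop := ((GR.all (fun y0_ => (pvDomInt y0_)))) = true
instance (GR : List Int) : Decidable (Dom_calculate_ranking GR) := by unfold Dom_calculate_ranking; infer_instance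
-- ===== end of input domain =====

-- B replaces A's single-pass if/elif-append loop by three staged passes over a
-- preallocated array ("Poor" everywhere, then overwrite "Good", then "Exceptional");
-- same O(n) cost, different decomposition.


-- ===== PORT A =====
def calculate_ranking (GR : List Int) : List String :=
  GR.foldl (fun ranking rate =>
    if rate > 25 then ranking ++ ["Exceptional"]
    else if rate > 0 then ranking ++ ["Good"]
    else ranking ++ ["Poor"]) []

-- ===== PORT B =====
def calculate_ranking_alt (GR : List Int) : List String :=
  let ranking := List.replicate GR.length "Poor"
  let ranking := (PySem.List.enumerate GR 0).foldl
    (fun rk ir => if ir.2 > 0 then rk.set ir.1.toNat "Good" else rk) ranking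
  (PySem.List.enumerate GR 0).foldl
    (fun rk ir => if ir.2 > 25 then rk.set ir.1.toNat "Exceptional" else rk) ranking

-- ===== PRECONDITION & SPEC =====
def Spec_calculate_ranking (GR : List Int) (out : List String) : Prop := out = calculate_ranking_alt GR
instance (GR : List Int) (out : List String) : Decidable (Spec_calculate_ranking GR out) := by unfold Spec_calculate_ranking; infer_instance

-- ===== CLAIM (what is proved, stated in full; the proofs are below) =====
def Claim_equal_calculate_ranking : Prop := ∀ (GR : List Int), Dom_calculate_ranking GR → Spec_calculate_ranking GR (calculate_ranking GR)

-- ===== LEMMAS AND PROOFS =====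
theorem set_append_len {α : Type} (u v : List α) (s lab : α) :
    (u ++ s :: v).set u.length lab = u ++ lab :: v := by
  induction u with
  | nil => rfl
  | cons a u ih => simp [List.set, ih]

theorem pass_eq (p : Int → Prop) [DecidablePred p] (lab : String) :
    ∀ (GR : List Int) (u v : List String), v.length = GR.length →
    (PySem.List.enumerate GR (u.length : Int)).foldl
      (fun rk ir => if p ir.2 then rk.set ir.1.toNat lab else rk) (u ++ v)
    = u ++ GR.zipWith (fun r s => if p r then lab else s) v := by
  intro GR
  induction GR with
  | nil => intro u v h; simp_all [PySem.List.enumerate_nil]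
  | cons r t ih =>
    intro u v h
    cases v with
    | nil => simp at h
    | cons s v' =>
      simp only [PySem.List.enumerate_cons, List.foldl_cons, List.zipWith]
      have hstep : (if p r then (u ++ s :: v').set ((u.length : Int)).toNat lab else u ++ s :: v')
          = (u ++ [if p r then lab else s]) ++ v' := by
        by_cases hp : p r <;> simp [hp, set_append_len]
      rw [hstep]
      have hlen : ((u.length : Int) + 1) = (((u ++ [if p r then lab else s]).length : Nat) : Int) := by
        simp
      rw [hlen, ih (u ++ [if p r then lab else s]) v' (by simp_all)]
      simp

theorem zipWith_rep (p : Int → Prop) [DecidablePred p] (lab c : String) :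
    ∀ GR : List Int,
    GR.zipWith (fun r s => if p r then lab else s) (List.replicate GR.length c)
    = GR.map (fun r => if p r then lab else c) := by
  intro GR
  induction GR with
  | nil => rfl
  | cons r t ih => simp [List.replicate_succ, ih]

theorem zipWith_map (p : Int → Prop) [DecidablePred p] (lab : String) (g : Int → String) :
    ∀ GR : List Int,
    GR.zipWith (fun r s => if p r then lab else s) (GR.map g)
    = GR.map (fun r => if p r then lab else g r) := by
  intro GR
  induction GR with
  | nil => rfl
  | cons r t ih => simp [ih]

def classify (r : Int) : String :=
  if r > 25 then "Exceptional" else if r > 0 then "Good" else "Poor"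

theorem pass0 (p : Int → Prop) [DecidablePred p] (lab : String) (GR : List Int) (v : List String)
    (h : v.length = GR.length) :
    (PySem.List.enumerate GR 0).foldl
      (fun rk ir => if p ir.2 then rk.set ir.1.toNat lab else rk) v
    = GR.zipWith (fun r s => if p r then lab else s) v := by
  simpa using pass_eq p lab GR [] v h

theorem alt_eq_map (GR : List Int) : calculate_ranking_alt GR = GR.map classify := by
  show (PySem.List.enumerate GR 0).foldl
      (fun rk ir => if ir.2 > 25 then rk.set ir.1.toNat "Exceptional" else rk)
      ((PySem.List.enumerate GR 0).foldl
        (fun rk ir => if ir.2 > 0 then rk.set ir.1.toNat "Good" else rk)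
        (List.replicate GR.length "Poor"))
    = GR.map classify
  rw [pass0 (fun r => r > 0) "Good" GR _ (by simp),
      zipWith_rep,
      pass0 (fun r => r > 25) "Exceptional" GR _ (by simp),
      zipWith_map]
  apply List.map_congr_left
  intro r _
  unfold classify
  by_cases h25 : r > 25
  · simp [h25]
  · by_cases h0' : r > 0 <;> simp [h25, h0']

theorem a_foldl_acc (GR : List Int) (acc : List String) :
    GR.foldl (fun ranking rate =>
      if rate > 25 then ranking ++ ["Exceptional"]
      else if rate > 0 then ranking ++ ["Good"]
      else ranking ++ ["Poor"]) acc = acc ++ GR.map classify := by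
  induction GR generalizing acc with
  | nil => simp
  | cons r t ih =>
    simp only [List.foldl_cons, List.map_cons]
    rw [ih]
    unfold classify
    by_cases h25 : r > 25
    · simp [h25]
    · by_cases h0 : r > 0 <;> simp [h25, h0]

-- ===== VERDICT (by name: the statement is the Claim_ definition above) =====
theorem calculate_ranking_spec : Claim_equal_calculate_ranking := by
  intro GR _
  unfold Spec_calculate_ranking calculate_ranking
  rw [alt_eq_map]
  simpa using a_foldl_acc GR []
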